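-- pv_equiv track=rewrite | github.com/roxana-hgh/assemblers | addition_and_subtraction.py | addition
-- ===== SOURCE A (Python) =====
-- def bin2comp(n, bits):
--     s = bin(n & int("1"*bits, 2))[2:]
--     return ("{0:0>%s}" % (bits)).format(s)
--
-- def addition(num1, num2, bit_len):
--     bin_num1 = bin2comp(num1,bit_len)
--     bin_num2 = bin2comp(num2,bit_len)
--
--     result = ''
--     carry = 0
--     for i in range(bit_len-1, -1, -1):  #add numbers bit by bit from right to left
--         r = carry
--         r += 1 if bin_num1[i] == '1' else 0 #add carry if result is > 1
--         r += 1 if bin_num2[i] == '1' else 0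
--         result = ('1' if r % 2 == 1 else '0') + result
--         carry = 0 if r < 2 else 1
--
--     # convert result 2'compliment binary form to decimal
--     while len(result) < bit_len:
--         result = '0'+ result
--     if result[0] == '0':
--         return int(result, 2)
--     else:
--         return -1 * (int(''.join('1' if x == '0' else '0' for x in result), 2) + 1)
-- ===== SOURCE B (Python) =====
-- def addition(num1, num2, bit_len):
--     half = 1 << (bit_len - 1)
--     masked = (num1 + num2) % (2 * half)
--     return masked - 2 * half if masked >= half else masked
-- ===== Notes on version B (the rewrite author's own statement) =====
-- stated objective: faster
-- what changed: replaces building two's-complement bit strings and a character-by-character ripple-carry loop with direct arithmetic: reduce the sum modulo 2^bit_len and subtract 2^bit_len when the sign bit is set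
import Mathlib
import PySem

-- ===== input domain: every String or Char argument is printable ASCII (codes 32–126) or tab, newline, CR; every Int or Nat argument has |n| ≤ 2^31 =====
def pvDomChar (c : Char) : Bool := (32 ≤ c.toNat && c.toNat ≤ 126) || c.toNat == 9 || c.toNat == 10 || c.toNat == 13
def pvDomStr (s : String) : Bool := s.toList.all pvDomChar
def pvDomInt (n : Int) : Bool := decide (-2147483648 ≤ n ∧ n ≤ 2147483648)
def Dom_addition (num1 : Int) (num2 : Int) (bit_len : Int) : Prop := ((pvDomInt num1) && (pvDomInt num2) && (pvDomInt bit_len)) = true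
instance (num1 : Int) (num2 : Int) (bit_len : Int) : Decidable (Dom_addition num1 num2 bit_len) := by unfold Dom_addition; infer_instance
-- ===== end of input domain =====

-- B replaces A's bit-string ripple-carry loop by direct modular arithmetic on the sum (objective: faster).

-- ===== PORT A =====
-- bin(n)[2:] for n ≥ 0 (exact there; A only calls it on n & (2^bits-1) ≥ 0);
-- tail-recursive digit accumulation, as a library routine may be
def pyBinRepAux (n : Nat) (acc : List Char) : List Char :=
  if n < 2 then (if n = 1 then '1' else '0') :: acc
  else pyBinRepAux (n / 2) ((if n % 2 = 1 then '1' else '0') :: acc)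
termination_by n
decreasing_by omega

def pyBinRep (n : Nat) : List Char := pyBinRepAux n []

-- bin2comp: 'int("1"*bits, 2)' = 2^bits - 1 for bits ≥ 1 (Pre; bits ≤ 0 raises ValueError in Python),
-- and 'n & (2^bits - 1)' = n mod 2^bits (exact); '("{0:0>%s}" % bits).format(s)' left-pads with '0' to width bits.
def bin2comp (n : Int) (bits : Int) : List Char :=
  let s := pyBinRep ((PySem.Int.mod n ((2 ^ bits.toNat : Nat) : Int)).toNat)
  List.replicate (bits.toNat - s.length) '0' ++ s

-- the body of A's for-loop; state = (result, carry)
def addStep (b1 b2 : List Char) (st : List Char × Int) (i : Int) : List Char × Int :=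
  let r := st.2 + (if PySem.List.pyGet? b1 i = some '1' then 1 else 0)
               + (if PySem.List.pyGet? b2 i = some '1' then 1 else 0)
  ((if PySem.Int.mod r 2 = 1 then '1' else '0') :: st.1, if r < 2 then 0 else 1)

-- A's 'while len(result) < bit_len: result = "0" + result'
def padLoop (m : Nat) (l : List Char) : List Char :=
  if l.length < m then padLoop m ('0' :: l) else l
termination_by m - l.length

-- int(s, 2) (exact for strings of '0'/'1' digits, which is all A passes it)
def pyIntBin (l : List Char) : Int := l.foldl (fun a c => 2 * a + (if c = '1' then 1 else 0)) 0

def addition (num1 : Int) (num2 : Int) (bit_len : Int) : Int :=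
  let b1 := bin2comp num1 bit_len
  let b2 := bin2comp num2 bit_len
  let st := (PySem.List.pyRange (bit_len - 1) (-1) (-1)).foldl (addStep b1 b2) ([], 0)
  let result := padLoop bit_len.toNat st.1
  if result.head? = some '0' then pyIntBin result
  else -1 * (pyIntBin (result.map (fun x => if x = '0' then '1' else '0')) + 1)

-- ===== PORT B =====
-- '1 << (bit_len - 1)' = 2^(bit_len-1), exact for bit_len ≥ 1 (Pre)
def addition_alt (num1 : Int) (num2 : Int) (bit_len : Int) : Int :=
  let half : Int := ((2 ^ (bit_len - 1).toNat : Nat) : Int)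
  let masked := PySem.Int.mod (num1 + num2) (2 * half)
  if half ≤ masked then masked - 2 * half else masked

-- ===== PRECONDITION & SPEC =====
-- Pre_ excludes only bit_len ≤ 0, where both A and B raise ValueError in Python.
def Pre_addition (num1 : Int) (num2 : Int) (bit_len : Int) : Prop := 1 ≤ bit_len
instance (num1 : Int) (num2 : Int) (bit_len : Int) : Decidable (Pre_addition num1 num2 bit_len) := by unfold Pre_addition; infer_instance
def pvWitness_addition : Int × Int × Int := (3, 5, 8)

def Spec_addition (num1 : Int) (num2 : Int) (bit_len : Int) (out : Int) : Prop := out = addition_alt num1 num2 bit_len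
instance (num1 : Int) (num2 : Int) (bit_len : Int) (out : Int) : Decidable (Spec_addition num1 num2 bit_len out) := by unfold Spec_addition; infer_instance

-- ===== CLAIM (what is proved, stated in full; the proofs are below) =====
def Claim_equal_addition : Prop := ∀ (num1 : Int) (num2 : Int) (bit_len : Int), Dom_addition num1 num2 bit_len → Pre_addition num1 num2 bit_len → Spec_addition num1 num2 bit_len (addition num1 num2 bit_len)

-- ===== LEMMAS AND PROOFS =====

-- the m-bit binary string (MSB first) of S's low bits
def bitsChars (m S : Nat) : List Char := (List.range m).reverse.map (fun j => if S.testBit j then '1' else '0')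

theorem bitsChars_length (m S : Nat) : (bitsChars m S).length = m := by
  simp [bitsChars]

theorem bitsChars_cons (m S : Nat) :
    bitsChars (m + 1) S = (if S.testBit m then '1' else '0') :: bitsChars m S := by
  simp [bitsChars, List.range_succ]

theorem bitsChars_snoc (m S : Nat) :
    bitsChars (m + 1) S = bitsChars m (S / 2) ++ [if S.testBit 0 then '1' else '0'] := by
  have h : List.range (m + 1) = 0 :: (List.range m).map Nat.succ := List.range_succ_eq_map
  simp only [bitsChars, h, List.reverse_cons, List.map_reverse, List.map_map, List.map_append]
  simp [Function.comp, Nat.succ_eq_add_one, Nat.testBit_add_one]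

theorem pyBinRepAux_append (n : Nat) (acc : List Char) :
    pyBinRepAux n acc = pyBinRepAux n [] ++ acc := by
  conv_lhs => rw [pyBinRepAux]
  conv_rhs => rw [pyBinRepAux]
  by_cases h : n < 2
  · rw [if_pos h, if_pos h]
    simp
  · rw [if_neg h, if_neg h]
    rw [pyBinRepAux_append (n / 2) ((if n % 2 = 1 then '1' else '0') :: acc),
        pyBinRepAux_append (n / 2) [if n % 2 = 1 then '1' else '0']]
    simp
termination_by n
decreasing_by all_goals omega

theorem pyBinRep_step (n : Nat) : pyBinRep n
    = if n < 2 then [if n = 1 then '1' else '0']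
      else pyBinRep (n / 2) ++ [if n % 2 = 1 then '1' else '0'] := by
  rw [show pyBinRep n = pyBinRepAux n [] from rfl, pyBinRepAux]
  split
  · rfl
  · rw [pyBinRepAux_append]
    rfl

theorem pyBinRep_lt (n : Nat) : n < 2 ^ (pyBinRep n).length := by
  rw [pyBinRep_step]
  split
  · simp only [List.length_cons, List.length_nil]
    norm_num; omega
  · rename_i h
    have ih := pyBinRep_lt (n / 2)
    simp only [List.length_append, List.length_cons, List.length_nil, Nat.zero_add]
    have : 2 ^ ((pyBinRep (n / 2)).length + 1) = 2 ^ (pyBinRep (n / 2)).length * 2 := by ring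
    omega
termination_by n
decreasing_by omega

theorem pyBinRep_eq (n : Nat) : pyBinRep n = bitsChars (pyBinRep n).length n := by
  conv_lhs => rw [pyBinRep_step]
  rw [pyBinRep_step n]
  split
  · rename_i h
    interval_cases n <;> simp [bitsChars, List.range_succ]
  · rename_i h
    have ih := pyBinRep_eq (n / 2)
    simp only [List.length_append, List.length_cons, List.length_nil, Nat.zero_add]
    rw [bitsChars_snoc, ← ih]
    congr 1
    simp [Nat.testBit_zero]
termination_by n
decreasing_by omega

theorem pyBinRep_len_le (n m : Nat) (hm : 1 ≤ m) (h : n < 2 ^ m) : (pyBinRep n).length ≤ m := by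
  rw [pyBinRep_step]
  split
  · simpa using hm
  · rename_i hn
    have h2 : n / 2 < 2 ^ (m - 1) := by
      have : 2 ^ m = 2 ^ (m - 1) * 2 := by
        rw [← pow_succ]; congr 1; omega
      omega
    have hm1 : 1 ≤ m - 1 := by
      by_contra hc
      have : m = 1 := by omega
      subst this
      simp at h2
      omega
    have ih := pyBinRep_len_le (n / 2) (m - 1) hm1 h2
    simp only [List.length_append, List.length_cons, List.length_nil]
    omega
termination_by n
decreasing_by omega

theorem bitsChars_extend (L m S : Nat) (h : L ≤ m) (hS : S < 2 ^ L) :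
    bitsChars m S = List.replicate (m - L) '0' ++ bitsChars L S := by
  induction m with
  | zero =>
    have : L = 0 := by omega
    subst this
    simp
  | succ m ih =>
    rcases Nat.lt_or_ge L (m + 1) with hlt | hge
    · have hLm : L ≤ m := by omega
      have hbit : S.testBit m = false := by
        apply Nat.testBit_lt_two_pow
        calc S < 2 ^ L := hS
          _ ≤ 2 ^ m := Nat.pow_le_pow_right (by omega) hLm
      rw [bitsChars_cons, hbit, ih hLm]
      have : m + 1 - L = (m - L) + 1 := by omega
      rw [this, List.replicate_succ]
      simp
    · have : L = m + 1 := by omega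
      subst this
      simp

theorem bin2comp_eq (n bits : Int) (h : 1 ≤ bits) :
    bin2comp n bits = bitsChars bits.toNat ((n.emod (2 ^ bits.toNat)).toNat) := by
  unfold bin2comp
  have hpos : (0 : Int) < 2 ^ bits.toNat := by positivity
  rw [show ((2 ^ bits.toNat : Nat) : Int) = (2 : Int) ^ bits.toNat from by push_cast; rfl]
  rw [PySem.Int.mod_eq_emod_of_pos hpos]
  set a := (n.emod (2 ^ bits.toNat)).toNat with ha
  show List.replicate (bits.toNat - (pyBinRep a).length) '0' ++ pyBinRep a = bitsChars bits.toNat a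
  have hm : 1 ≤ bits.toNat := by omega
  have hlt : a < 2 ^ bits.toNat := by
    have h1 : n.emod (2 ^ bits.toNat) < 2 ^ bits.toNat := Int.emod_lt_of_pos n hpos
    have h2 : 0 ≤ n.emod (2 ^ bits.toNat) := Int.emod_nonneg n (by positivity)
    have h3 : ((2 ^ bits.toNat : Nat) : Int) = (2 : Int) ^ bits.toNat := by push_cast; rfl
    omega
  have hlen := pyBinRep_len_le a bits.toNat hm hlt
  rw [pyBinRep_eq a, bitsChars_extend (pyBinRep a).length bits.toNat a
      (by rw [pyBinRep_eq a, bitsChars_length] at hlen ⊢; exact hlen)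
      (by rw [pyBinRep_eq a, bitsChars_length]; exact pyBinRep_lt a)]
  rw [bitsChars_length, ← pyBinRep_eq]

theorem padLoop_eq (m : Nat) (l : List Char) (h : l.length = m) : padLoop m l = l := by
  unfold padLoop; simp [h]

theorem bitsChars_get (m S : Nat) (i : Int) (h0 : 0 ≤ i) (h1 : i < (m : Int)) :
    PySem.List.pyGet? (bitsChars m S) i = some (if S.testBit (m - 1 - i.toNat) then '1' else '0') := by
  rw [PySem.List.pyGet?_of_nonneg _ h0]
  have hk : i.toNat < m := by omega
  have hk2 : i.toNat < (bitsChars m S).length := by rw [bitsChars_length]; exact hk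
  rw [List.getElem?_eq_getElem hk2]
  congr 1
  simp only [bitsChars, List.getElem_map, List.getElem_reverse, List.getElem_range]
  simp

theorem ripple (m a b : Nat) (ha : a < 2 ^ m) (hb : b < 2 ^ m) :
    ∀ (k : Nat), k ≤ m → ∀ (c : Nat), c ≤ 1 → ∀ (res : List Char),
    (PySem.List.pyRange ((k : Int) - 1) (-1) (-1)).foldl (addStep (bitsChars m a) (bitsChars m b)) (res, (c : Int))
    = (bitsChars k (a / 2 ^ (m - k) + b / 2 ^ (m - k) + c) ++ res,
       (((a / 2 ^ (m - k) + b / 2 ^ (m - k) + c) / 2 ^ k : Nat) : Int)) := by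
  intro k
  induction k with
  | zero =>
    intro hk c hc res
    simp only [Nat.cast_zero, zero_sub]
    rw [PySem.List.pyRange_neg_one_eq_nil (by norm_num)]
    simp [bitsChars, Nat.div_eq_of_lt ha, Nat.div_eq_of_lt hb]
  | succ k ih =>
    intro hk c hc res
    have hkm : k < m := by omega
    have hxcast : ((k + 1 : Nat) : Int) - 1 = ((k : Nat) : Int) := by push_cast; ring
    rw [hxcast, PySem.List.pyRange_neg_one_cons (by omega), List.foldl_cons]
    have hga := bitsChars_get m a ((k : Nat) : Int) (by positivity) (by exact_mod_cast hkm)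
    have hgb := bitsChars_get m b ((k : Nat) : Int) (by positivity) (by exact_mod_cast hkm)
    simp only [Int.toNat_natCast] at hga hgb
    have hstep : addStep (bitsChars m a) (bitsChars m b) (res, (c : Int)) ((k : Nat) : Int)
        = ((if (c + (if a.testBit (m - 1 - k) then 1 else 0) + (if b.testBit (m - 1 - k) then 1 else 0)) % 2 = 1 then '1' else '0') :: res,
           (((c + (if a.testBit (m - 1 - k) then 1 else 0) + (if b.testBit (m - 1 - k) then 1 else 0)) / 2 : Nat) : Int)) := by
      unfold addStep
      simp only [hga, hgb]
      have h2 : (0 : Int) < 2 := by norm_num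
      rw [PySem.Int.mod_eq_emod_of_pos h2]
      rcases Bool.eq_false_or_eq_true (a.testBit (m - 1 - k)) with hA | hA <;>
        rcases Bool.eq_false_or_eq_true (b.testBit (m - 1 - k)) with hB | hB <;>
        simp only [hA, hB] <;> interval_cases c <;> norm_num <;> decide
    rw [hstep]
    set rn := c + (if a.testBit (m - 1 - k) then 1 else 0) + (if b.testBit (m - 1 - k) then 1 else 0) with hrn
    rw [ih (by omega) (rn / 2) (by rw [hrn]; split_ifs <;> omega) _]
    -- arithmetic bookkeeping
    have hj2 : m - (k + 1) = m - 1 - k := by omega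
    have ea : a / 2 ^ (m - (k + 1)) = a / 2 ^ (m - 1 - k) := by rw [hj2]
    have eb : b / 2 ^ (m - (k + 1)) = b / 2 ^ (m - 1 - k) := by rw [hj2]
    have hA2 : (if a.testBit (m - 1 - k) then 1 else 0) = a / 2 ^ (m - 1 - k) % 2 := by
      rw [Nat.testBit_eq_decide_div_mod_eq]
      simp only [decide_eq_true_eq]
      split_ifs <;> omega
    have hB2 : (if b.testBit (m - 1 - k) then 1 else 0) = b / 2 ^ (m - 1 - k) % 2 := by
      rw [Nat.testBit_eq_decide_div_mod_eq]
      simp only [decide_eq_true_eq]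
      split_ifs <;> omega
    have hda : a / 2 ^ (m - k) = a / 2 ^ (m - 1 - k) / 2 := by
      rw [Nat.div_div_eq_div_mul, ← pow_succ]
      congr 2
      omega
    have hdb : b / 2 ^ (m - k) = b / 2 ^ (m - 1 - k) / 2 := by
      rw [Nat.div_div_eq_div_mul, ← pow_succ]
      congr 2
      omega
    have hrn2 : rn = c + a / 2 ^ (m - 1 - k) % 2 + b / 2 ^ (m - 1 - k) % 2 := by
      rw [hrn, hA2, hB2]
    have hS2 : a / 2 ^ (m - k) + b / 2 ^ (m - k) + rn / 2
        = (a / 2 ^ (m - (k + 1)) + b / 2 ^ (m - (k + 1)) + c) / 2 := by omega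
    have hSm : (a / 2 ^ (m - (k + 1)) + b / 2 ^ (m - (k + 1)) + c) % 2 = rn % 2 := by omega
    rw [hS2]
    refine Prod.ext ?_ ?_
    · show bitsChars k ((a / 2 ^ (m - (k + 1)) + b / 2 ^ (m - (k + 1)) + c) / 2)
          ++ ((if rn % 2 = 1 then '1' else '0') :: res)
        = bitsChars (k + 1) (a / 2 ^ (m - (k + 1)) + b / 2 ^ (m - (k + 1)) + c) ++ res
      rw [bitsChars_snoc]
      have hch : (if (a / 2 ^ (m - (k + 1)) + b / 2 ^ (m - (k + 1)) + c).testBit 0 then '1' else '0')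
          = (if rn % 2 = 1 then '1' else '0') := by
        rw [Nat.testBit_eq_decide_div_mod_eq]
        simp only [pow_zero, Nat.div_one, decide_eq_true_eq]
        rw [hSm]
      rw [hch, List.append_assoc]
      rfl
    · show (((a / 2 ^ (m - (k + 1)) + b / 2 ^ (m - (k + 1)) + c) / 2 / 2 ^ k : Nat) : Int)
        = (((a / 2 ^ (m - (k + 1)) + b / 2 ^ (m - (k + 1)) + c) / 2 ^ (k + 1) : Nat) : Int)
      congr 1
      rw [Nat.div_div_eq_div_mul, ← pow_succ']

theorem parse_bits (m S : Nat) : ∀ acc : Int,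
    (bitsChars m S).foldl (fun a c => 2 * a + (if c = '1' then 1 else 0)) acc
    = acc * 2 ^ m + ((S % 2 ^ m : Nat) : Int) := by
  induction m with
  | zero => intro acc; simp [bitsChars]
  | succ m ih =>
    intro acc
    rw [bitsChars_cons, List.foldl_cons, ih]
    have e : S % 2 ^ (m + 1) = S % 2 ^ m + 2 ^ m * (S / 2 ^ m % 2) := by
      rw [pow_succ, Nat.mod_mul]
    have hb2 : (S.testBit m = true → S / 2 ^ m % 2 = 1) ∧ (S.testBit m = false → S / 2 ^ m % 2 = 0) := by
      constructor <;> intro h <;> rw [Nat.testBit_eq_decide_div_mod_eq] at h <;> simp at h <;> omega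
    rcases Bool.eq_false_or_eq_true (S.testBit m) with h | h
    · rw [e, hb2.1 h, h]
      push_cast
      simp
      try ring
    · rw [e, hb2.2 h, h]
      push_cast
      simp
      try ring
theorem parse_flip (m S : Nat) : ∀ acc : Int,
    ((bitsChars m S).map (fun x => if x = '0' then '1' else '0')).foldl
        (fun a c => 2 * a + (if c = '1' then 1 else 0)) acc
    = acc * 2 ^ m + 2 ^ m - 1 - ((S % 2 ^ m : Nat) : Int) := by
  induction m with
  | zero => intro acc; simp [bitsChars]
  | succ m ih =>
    intro acc
    rw [bitsChars_cons, List.map_cons, List.foldl_cons, ih]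
    have e : S % 2 ^ (m + 1) = S % 2 ^ m + 2 ^ m * (S / 2 ^ m % 2) := by
      rw [pow_succ, Nat.mod_mul]
    have hb2 : (S.testBit m = true → S / 2 ^ m % 2 = 1) ∧ (S.testBit m = false → S / 2 ^ m % 2 = 0) := by
      constructor <;> intro h <;> rw [Nat.testBit_eq_decide_div_mod_eq] at h <;> simp at h <;> omega
    rcases Bool.eq_false_or_eq_true (S.testBit m) with h | h
    · rw [e, hb2.1 h, h]
      push_cast
      simp
      try ring
    · rw [e, hb2.2 h, h]
      push_cast
      simp
      try ring

theorem lt_half_of_testBit_false (m x : Nat) (h1 : 1 ≤ m) (hx : x < 2 ^ m)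
    (ht : x.testBit (m - 1) = false) : x < 2 ^ (m - 1) := by
  apply Nat.lt_pow_two_of_testBit
  intro j hj
  rcases Nat.eq_or_lt_of_le hj with h | h
  · rwa [← h]
  · apply Nat.testBit_lt_two_pow
    calc x < 2 ^ m := hx
      _ ≤ 2 ^ j := Nat.pow_le_pow_right (by norm_num) (by omega)

theorem half_le_of_testBit_true (m x : Nat) (ht : x.testBit (m - 1) = true) : 2 ^ (m - 1) ≤ x := by
  exact Nat.ge_two_pow_of_testBit ht

-- ===== VERDICT (by name: the statement is the Claim_ definition above) =====
theorem bits_head (m S : Nat) (h : 1 ≤ m) :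
    (bitsChars m S).head? = some (if S.testBit (m - 1) then '1' else '0') := by
  obtain ⟨m', rfl⟩ : ∃ m', m = m' + 1 := ⟨m - 1, by omega⟩
  rw [bitsChars_cons]
  simp

theorem addition_main (num1 num2 bit_len : Int) (hpre : 1 ≤ bit_len) :
    addition num1 num2 bit_len = addition_alt num1 num2 bit_len := by
  unfold addition addition_alt
  dsimp only []
  set m := bit_len.toNat with hm
  have hm1 : 1 ≤ m := by omega
  have hMcast : ((2 ^ m : Nat) : Int) = (2 : Int) ^ m := by push_cast; rfl
  have hpos : (0 : Int) < 2 ^ m := by positivity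
  rw [bin2comp_eq num1 bit_len hpre, bin2comp_eq num2 bit_len hpre]
  set a := (num1.emod (2 ^ m)).toNat with haDef
  set b := (num2.emod (2 ^ m)).toNat with hbDef
  have ha : a < 2 ^ m := by
    have h1 : num1.emod (2 ^ m) < 2 ^ m := Int.emod_lt_of_pos num1 hpos
    have h2 : (0 : Int) ≤ num1.emod (2 ^ m) := Int.emod_nonneg num1 (ne_of_gt hpos)
    omega
  have hb : b < 2 ^ m := by
    have h1 : num2.emod (2 ^ m) < 2 ^ m := Int.emod_lt_of_pos num2 hpos
    have h2 : (0 : Int) ≤ num2.emod (2 ^ m) := Int.emod_nonneg num2 (ne_of_gt hpos)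
    omega
  have hbl : bit_len - 1 = ((m : Nat) : Int) - 1 := by omega
  have hr := ripple m a b ha hb m le_rfl 0 (by omega) []
  simp only [Nat.sub_self, pow_zero, Nat.div_one, Nat.add_zero, Nat.cast_zero,
    List.append_nil] at hr
  rw [hbl, hr]
  rw [padLoop_eq m _ (bitsChars_length m (a + b))]
  have hhead := bits_head m (a + b) hm1
  -- B-side modulus facts
  have hhalfexp : ((m : Int) - 1).toNat = m - 1 := by omega
  have h2h : (2 : Int) * 2 ^ (m - 1) = 2 ^ m := by
    rw [← pow_succ']
    congr 1
    omega
  have hmask : PySem.Int.mod (num1 + num2) (2 * 2 ^ (m - 1) : Int)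
      = (((a + b) % 2 ^ m : Nat) : Int) := by
    rw [h2h, PySem.Int.mod_eq_emod_of_pos hpos, Int.add_emod]
    have e1 : num1 % ((2 : Int) ^ m) = (a : Int) := by
      have h2 : (0 : Int) ≤ num1.emod (2 ^ m) := Int.emod_nonneg num1 (ne_of_gt hpos)
      have h3 : num1.emod ((2 : Int) ^ m) = num1 % ((2 : Int) ^ m) := rfl
      omega
    have e2 : num2 % ((2 : Int) ^ m) = (b : Int) := by
      have h2 : (0 : Int) ≤ num2.emod (2 ^ m) := Int.emod_nonneg num2 (ne_of_gt hpos)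
      have h3 : num2.emod ((2 : Int) ^ m) = num2 % ((2 : Int) ^ m) := rfl
      omega
    rw [e1, e2, ← hMcast]
    push_cast
    rfl
  have hxlt : (a + b) % 2 ^ m < 2 ^ m := Nat.mod_lt _ (by positivity)
  have hxbit : ((a + b) % 2 ^ m).testBit (m - 1) = (a + b).testBit (m - 1) := by
    rw [Nat.testBit_mod_two_pow]
    have : m - 1 < m := by omega
    simp [this]
  have hhcast : ((2 ^ (m - 1) : Nat) : Int) = (2 : Int) ^ (m - 1) := by push_cast; rfl
  rw [hhead, hhalfexp, hhcast, hmask]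
  rcases Bool.eq_false_or_eq_true ((a + b).testBit (m - 1)) with hbit | hbit
  · -- top bit set: both sides return the masked sum minus 2^bit_len
    have hxbig : 2 ^ (m - 1) ≤ (a + b) % 2 ^ m :=
      half_le_of_testBit_true m _ (by rw [hxbit]; exact hbit)
    rw [hbit]
    have hcond : (2 : Int) ^ (m - 1) ≤ (((a + b) % 2 ^ m : Nat) : Int) := by omega
    rw [if_pos hcond, if_neg (by decide : ¬ (some (if true = true then '1' else '0') = some ('0' : Char)))]
    unfold pyIntBin
    rw [parse_flip m (a + b) 0]
    rw [h2h, ← hMcast]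
    omega

  · -- top bit clear: both sides return the masked sum
    have hxsmall : (a + b) % 2 ^ m < 2 ^ (m - 1) :=
      lt_half_of_testBit_false m _ hm1 hxlt (by rw [hxbit]; exact hbit)
    rw [hbit]
    have hcond : ¬ ((2 : Int) ^ (m - 1) ≤ (((a + b) % 2 ^ m : Nat) : Int)) := by omega
    rw [if_neg hcond, if_pos (by decide : some (if false = true then '1' else '0') = some ('0' : Char))]
    unfold pyIntBin
    rw [parse_bits m (a + b) 0]
    ring
theorem addition_spec : Claim_equal_addition := by
  unfold Claim_equal_addition
  intro num1 num2 bit_len _ hpre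
  unfold Spec_addition
  exact addition_main num1 num2 bit_len hpre
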